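-- pv_equiv track=rewrite | github.com/TarunShaji/GSC_QuickView | src/device_visibility_analyzer.py | split_by_device
-- ===== SOURCE A (Python) =====
-- from typing import Dict, List, Any
--
-- def split_by_device(metrics: List[Dict[str, Any]]) -> Dict[str, List[Dict[str, Any]]]:
--     """
--     Group metrics by device type
--
--     Returns:
--         Dict with keys: 'desktop', 'mobile', 'tablet'
--     """
--     device_groups = {
--         'desktop': [],
--         'mobile': [],
--         'tablet': []
--     }
--
--     for metric in metrics:
--         device = metric.get('device', '').lower()
--         if device in device_groups:
--             device_groups[device].append(metric)
--
--     return device_groups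
-- ===== SOURCE B (Python) =====
-- def split_by_device(metrics):
--     """Group metrics by device type (keys: desktop, mobile, tablet)."""
--     return {d: [m for m in metrics if m.get('device', '').lower() == d]
--             for d in ('desktop', 'mobile', 'tablet')}
-- ===== Notes on version B (the rewrite author's own statement) =====
-- stated objective: idiomatic
-- what changed: Replaces the single dispatch loop with a mutable three-bucket dict by a dict comprehension over the three fixed keys, each bucket built as one filter pass over the metrics list.
import Mathlib
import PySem

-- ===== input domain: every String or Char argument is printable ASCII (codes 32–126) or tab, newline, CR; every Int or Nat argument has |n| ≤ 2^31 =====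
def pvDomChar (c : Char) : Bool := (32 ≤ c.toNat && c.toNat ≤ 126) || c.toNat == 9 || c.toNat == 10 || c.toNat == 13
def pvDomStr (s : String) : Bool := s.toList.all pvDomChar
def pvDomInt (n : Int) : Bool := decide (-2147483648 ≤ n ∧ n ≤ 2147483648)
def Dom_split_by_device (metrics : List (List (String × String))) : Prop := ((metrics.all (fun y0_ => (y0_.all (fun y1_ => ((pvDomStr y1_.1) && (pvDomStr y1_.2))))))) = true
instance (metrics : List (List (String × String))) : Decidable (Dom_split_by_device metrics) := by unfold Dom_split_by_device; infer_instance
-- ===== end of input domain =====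

-- ===== PORT A =====
-- loop body of A, named so the invariant lemma below can talk about one step
def pvStepA (device_groups : PySem.Dict String (List (List (String × String))))
    (metric : List (String × String)) : PySem.Dict String (List (List (String × String))) :=
  let device := PySem.Str.lower (PySem.Dict.getD (PySem.Dict.mk metric) "device" "")
  if device_groups.contains device then
    device_groups.modify device [] (fun l => l ++ [metric])
  else device_groups

-- One honest line: B rebuilds the same three buckets by a comprehension over the fixed keys (one filter pass per key) instead of A's single dispatch loop into a mutable dict; idiomatic, same O(n) values.
def split_by_device (metrics : List (List (String × String))) : List (String × List (List (String × String))) :=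
  let init : PySem.Dict String (List (List (String × String))) :=
    PySem.Dict.ofList [("desktop", []), ("mobile", []), ("tablet", [])]
  let groups := metrics.foldl pvStepA init
  groups.items

-- ===== PORT B =====
def split_by_device_alt (metrics : List (List (String × String))) : List (String × List (List (String × String))) :=
  ["desktop", "mobile", "tablet"].map (fun d =>
    (d, metrics.filter (fun m => PySem.Str.lower (PySem.Dict.getD (PySem.Dict.mk m) "device" "") == d)))

-- ===== PRECONDITION & SPEC =====
def Spec_split_by_device (metrics : List (List (String × String))) (out : List (String × List (List (String × String)))) : Prop := out = split_by_device_alt metrics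
instance (metrics : List (List (String × String))) (out : List (String × List (List (String × String)))) : Decidable (Spec_split_by_device metrics out) := by unfold Spec_split_by_device; infer_instance

-- ===== CLAIM (what is proved, stated in full; the proofs are below) =====
def Claim_equal_split_by_device : Prop := ∀ (metrics : List (List (String × String))), Dom_split_by_device metrics → Spec_split_by_device metrics (split_by_device metrics)

-- ===== LEMMAS AND PROOFS =====

-- loop invariant: the fold over the three-key dict appends each metric to the bucket whose key its lowercased device equals
lemma split_loop (ms : List (List (String × String))) (l1 l2 l3 : List (List (String × String))) :
    (ms.foldl pvStepA (PySem.Dict.mk [("desktop", l1), ("mobile", l2), ("tablet", l3)])).items =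
    [("desktop", l1 ++ ms.filter (fun m => PySem.Str.lower (PySem.Dict.getD (PySem.Dict.mk m) "device" "") == "desktop")),
     ("mobile",  l2 ++ ms.filter (fun m => PySem.Str.lower (PySem.Dict.getD (PySem.Dict.mk m) "device" "") == "mobile")),
     ("tablet",  l3 ++ ms.filter (fun m => PySem.Str.lower (PySem.Dict.getD (PySem.Dict.mk m) "device" "") == "tablet"))] := by
  induction ms generalizing l1 l2 l3 with
  | nil => simp
  | cons m ms ih =>
    simp only [List.foldl_cons, List.filter_cons]
    by_cases h1 : PySem.Str.lower (PySem.Dict.getD (PySem.Dict.mk m) "device" "") = "desktop"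
    · have hstep : pvStepA (PySem.Dict.mk [("desktop", l1), ("mobile", l2), ("tablet", l3)]) m
          = PySem.Dict.mk [("desktop", l1 ++ [m]), ("mobile", l2), ("tablet", l3)] := by
        simp only [pvStepA]
        rw [h1]
        simp [PySem.Dict.contains, PySem.Dict.modify, PySem.Dict.insert,
              PySem.Dict.getD, PySem.Dict.get?]
      rw [hstep, ih]
      simp [h1]
    · by_cases h2 : PySem.Str.lower (PySem.Dict.getD (PySem.Dict.mk m) "device" "") = "mobile"
      · have hstep : pvStepA (PySem.Dict.mk [("desktop", l1), ("mobile", l2), ("tablet", l3)]) m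
            = PySem.Dict.mk [("desktop", l1), ("mobile", l2 ++ [m]), ("tablet", l3)] := by
          simp only [pvStepA]
          rw [h2]
          simp [PySem.Dict.contains, PySem.Dict.modify, PySem.Dict.insert,
                PySem.Dict.getD, PySem.Dict.get?]
        rw [hstep, ih]
        simp [h2]
      · by_cases h3 : PySem.Str.lower (PySem.Dict.getD (PySem.Dict.mk m) "device" "") = "tablet"
        · have hstep : pvStepA (PySem.Dict.mk [("desktop", l1), ("mobile", l2), ("tablet", l3)]) m
              = PySem.Dict.mk [("desktop", l1), ("mobile", l2), ("tablet", l3 ++ [m])] := by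
            simp only [pvStepA]
            rw [h3]
            simp [PySem.Dict.contains, PySem.Dict.modify, PySem.Dict.insert,
                  PySem.Dict.getD, PySem.Dict.get?]
          rw [hstep, ih]
          simp [h3]
        · have hstep : pvStepA (PySem.Dict.mk [("desktop", l1), ("mobile", l2), ("tablet", l3)]) m
              = PySem.Dict.mk [("desktop", l1), ("mobile", l2), ("tablet", l3)] := by
            have h1' := Ne.symm h1
            have h2' := Ne.symm h2
            have h3' := Ne.symm h3
            simp [pvStepA, PySem.Dict.contains, h1', h2', h3']
          rw [hstep, ih]
          simp [h1, h2, h3]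

-- ===== VERDICT (by name: the statement is the Claim_ definition above) =====
theorem split_by_device_spec : Claim_equal_split_by_device := by
  intro metrics _
  unfold Spec_split_by_device split_by_device split_by_device_alt
  simpa [PySem.Dict.ofList] using split_loop metrics [] [] []
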